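-- pv_equiv track=rewrite | github.com/kbu34/cosc262 | quiz/key_position.py | key_positions
-- ===== SOURCE A (Python) =====
-- def key_positions(strings):
--     k = len(max(strings, key=lambda x: len(x))) + 1
--     c = [0 for x in range(k)]
--     for stri in strings:
--         c[len(stri)] += 1
--     summ = 0
--     for i in range(k):
--         c[i], summ = summ, summ + c[i]
--     return c
-- ===== SOURCE B (Python) =====
-- def key_positions(strings):
--     k = len(max(strings, key=lambda x: len(x))) + 1
--     return [sum(1 for s in strings if len(s) < i) for i in range(k)]
-- ===== Notes on version B (the rewrite author's own statement) =====
-- stated objective: simpler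
-- what changed: Replaces the mutable histogram array plus in-place exclusive prefix-sum scan with a direct comprehension that, for each threshold i, counts the strings shorter than i.
import Mathlib
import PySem

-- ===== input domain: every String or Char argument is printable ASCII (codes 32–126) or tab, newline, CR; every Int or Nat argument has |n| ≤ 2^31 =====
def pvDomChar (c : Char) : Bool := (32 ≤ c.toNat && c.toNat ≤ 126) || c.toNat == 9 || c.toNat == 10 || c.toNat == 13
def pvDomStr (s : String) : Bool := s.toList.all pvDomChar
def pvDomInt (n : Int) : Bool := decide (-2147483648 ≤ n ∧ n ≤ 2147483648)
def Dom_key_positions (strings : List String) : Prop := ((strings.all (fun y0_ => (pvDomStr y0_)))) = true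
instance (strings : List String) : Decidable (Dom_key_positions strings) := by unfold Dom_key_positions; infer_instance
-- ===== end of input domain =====

-- B replaces A's histogram + in-place exclusive prefix-sum scan by directly counting,
-- for each threshold i, the strings shorter than i (simpler, not faster).

-- Python len(s) for a string: number of characters (exact: String data is its char list)
def pyLen (s : String) : Nat := s.toList.length

-- ===== PORT A =====
def key_positions (strings : List String) : List Int :=
  match PySem.List.max? strings (fun x => pyLen x) with   -- max(strings, key=lambda x: len(x))
  | none => []                                            -- Python: ValueError on empty, excluded by Pre_
  | some m =>
    let k := pyLen m + 1
    let c0 : List Int := (List.range k).map (fun _ => (0 : Int))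
    -- for stri in strings: c[len(stri)] += 1   (index always in range: len ≤ max len < k)
    let c1 := strings.foldl (fun c s => c.set (pyLen s) (c.getD (pyLen s) 0 + 1)) c0
    -- summ = 0; for i in range(k): c[i], summ = summ, summ + c[i]
    let p := (List.range k).foldl
      (fun (p : List Int × Int) i => (p.1.set i p.2, p.2 + p.1.getD i 0)) (c1, 0)
    p.1

-- ===== PORT B =====
def key_positions_alt (strings : List String) : List Int :=
  match PySem.List.max? strings (fun x => pyLen x) with
  | none => []                                            -- Python: ValueError on empty, excluded by Pre_
  | some m =>
    (List.range (pyLen m + 1)).map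
      (fun i => ((strings.countP (fun s => pyLen s < i)) : Int))

-- ===== PRECONDITION & SPEC =====
-- Pre_ excludes only the empty list, on which Python A (and B) raise ValueError in max().
def Pre_key_positions (strings : List String) : Prop := strings ≠ []
instance (strings : List String) : Decidable (Pre_key_positions strings) := by unfold Pre_key_positions; infer_instance
def pvWitness_key_positions : List String := (["a", "bc", ""])

def Spec_key_positions (strings : List String) (out : List Int) : Prop := out = key_positions_alt strings
instance (strings : List String) (out : List Int) : Decidable (Spec_key_positions strings out) := by unfold Spec_key_positions; infer_instance

-- ===== CLAIM (what is proved, stated in full; the proofs are below) =====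
def Claim_equal_key_positions : Prop := ∀ (strings : List String), Dom_key_positions strings → Pre_key_positions strings → Spec_key_positions strings (key_positions strings)

-- ===== LEMMAS AND PROOFS =====

-- histogram fold: entry i gains the number of occurrences of i
theorem hist_getD (ls : List Nat) : ∀ (c : List Int), (∀ l ∈ ls, l < c.length) →
    ∀ i : Nat,
      (ls.foldl (fun c l => c.set l (c.getD l 0 + 1)) c).getD i 0
        = c.getD i 0 + (ls.countP (fun l => l = i) : Int) := by
  induction ls with
  | nil => intro c _ i; simp
  | cons l t ih =>
    intro c hlt i
    simp only [List.foldl_cons, List.countP_cons]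
    rw [ih _ (by intro x hx; simpa using hlt x (by simp [hx]))]
    have hl : l < c.length := hlt l (by simp)
    by_cases h : l = i
    · subst h
      simp [List.getD, List.getElem?_set_self hl]
      ring
    · simp [List.getD, List.getElem?_set_ne (by omega : l ≠ i), h]

theorem hist_length (ls : List Nat) : ∀ (c : List Int),
    (ls.foldl (fun c l => c.set l (c.getD l 0 + 1)) c).length = c.length := by
  induction ls with
  | nil => intro c; rfl
  | cons l t ih => intro c; rw [List.foldl_cons, ih, List.length_set]

-- prefix-sum fold over range n: invariant
theorem prefix_invariant (c : List Int) : ∀ n : Nat, n ≤ c.length →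
    (let p := (List.range n).foldl
        (fun (p : List Int × Int) i => (p.1.set i p.2, p.2 + p.1.getD i 0)) (c, 0);
      p.1.length = c.length ∧
      p.2 = ∑ j ∈ Finset.range n, c.getD j 0 ∧
      ∀ i : Nat, p.1.getD i 0 = if i < n then ∑ j ∈ Finset.range i, c.getD j 0 else c.getD i 0) := by
  intro n
  induction n with
  | zero => intro _; exact ⟨rfl, by simp, by intro i; simp⟩
  | succ n ih =>
    intro hn
    obtain ⟨hlen, hsum, hget⟩ := ih (by omega)
    simp only [List.range_succ, List.foldl_append, List.foldl_cons, List.foldl_nil]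
    set p := (List.range n).foldl
        (fun (p : List Int × Int) i => (p.1.set i p.2, p.2 + p.1.getD i 0)) (c, 0) with hp
    refine ⟨by simpa using hlen, ?_, ?_⟩
    · have h2 : p.1.getD n 0 = c.getD n 0 := by rw [hget]; simp
      simp only [List.getD] at h2
      simp [h2, hsum, Finset.sum_range_succ]
    · intro i
      by_cases h : i = n
      · subst h
        have hi : i < p.1.length := by omega
        simp [List.getD, List.getElem?_set_self hi, hsum]
      · have : (p.1.set n p.2).getD i 0 = p.1.getD i 0 := by
          simp [List.getD, List.getElem?_set_ne (by omega : n ≠ i)]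
        rw [this, hget]
        by_cases h2 : i < n
        · simp [h2, Nat.lt_succ_of_lt h2]
        · have : ¬ i < n + 1 := by omega
          simp [h2, this]

-- counting identity: Σ_{j<i} #{l = j} = #{l < i}
theorem sum_count_eq_countP (ls : List Nat) (i : Nat) :
    ∑ j ∈ Finset.range i, (ls.countP (fun l => l = j) : Int)
      = (ls.countP (fun l => l < i) : Int) := by
  induction ls with
  | nil => simp
  | cons l t ih =>
    simp only [List.countP_cons]
    push_cast
    rw [Finset.sum_add_distrib]

    push_cast at ih
    rw [ih]
    congr 1
    have : ∑ j ∈ Finset.range i, (if (decide (l = j)) = true then (1:Int) else 0)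
        = ∑ j ∈ Finset.range i, (if l = j then (1:Int) else 0) := by
      apply Finset.sum_congr rfl; intro j _; simp
    rw [this, Finset.sum_ite_eq (Finset.range i) l (fun _ => (1:Int))]
    by_cases h : l < i <;> simp [h, Finset.mem_range]

-- ===== VERDICT (by name: the statement is the Claim_ definition above) =====
theorem key_positions_spec : Claim_equal_key_positions := by
  intro strings _ hpre
  unfold Spec_key_positions key_positions key_positions_alt
  cases hmax : PySem.List.max? strings (fun x => pyLen x) with
  | none => rfl
  | some m =>
    simp only
    set k := pyLen m + 1 with hk
    set c0 : List Int := (List.range k).map (fun _ => (0 : Int)) with hc0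
    have hc0len : c0.length = k := by simp [hc0]
    have hc0get : ∀ j, c0.getD j 0 = 0 := by
      intro j; simp [hc0, List.getD]
    have hbound : ∀ s ∈ strings, pyLen s < k := by
      intro s hs
      have := PySem.List.max?_isMax hmax s hs
      omega
    set c1 := strings.foldl (fun c s => c.set (pyLen s) (c.getD (pyLen s) 0 + 1)) c0 with hc1
    have hc1len : c1.length = k := by
      have : c1 = (strings.map pyLen).foldl (fun c l => c.set l (c.getD l 0 + 1)) c0 := by
        rw [hc1, List.foldl_map]
      rw [this, hist_length, hc0len]
    have hc1get : ∀ j, c1.getD j 0 = ((strings.map pyLen).countP (fun l => l = j) : Int) := by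
      intro j
      have : c1 = (strings.map pyLen).foldl (fun c l => c.set l (c.getD l 0 + 1)) c0 := by
        rw [hc1, List.foldl_map]
      rw [this, hist_getD _ c0 (by intro l hl; rw [hc0len]; obtain ⟨s, hs, rfl⟩ := List.mem_map.mp hl; exact hbound s hs), hc0get]
      ring
    obtain ⟨hplen, _, hpget⟩ := prefix_invariant c1 k (by omega)
    apply List.ext_getElem
    · rw [hplen, hc1len]; simp
    · intro i h1 h2
      have hik : i < k := by simpa using h2
      have hAi : _ = _ := hpget i
      rw [if_pos (by omega)] at hAi
      have hA : (((List.range k).foldl (fun (p : List Int × Int) i => (p.1.set i p.2, p.2 + p.1.getD i 0)) (c1, 0)).1)[i] =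
          ((strings.map pyLen).countP (fun l => l < i) : Int) := by
        rw [← List.getD_eq_getElem _ 0 h1, hAi]
        have : ∀ j ∈ Finset.range i, c1.getD j 0 = ((strings.map pyLen).countP (fun l => l = j) : Int) := by
          intro j _; exact hc1get j
        rw [Finset.sum_congr rfl this, sum_count_eq_countP]
      rw [hA]
      have hcomp : List.countP ((fun l => decide (l < i)) ∘ pyLen) strings
          = List.countP (fun s => decide (pyLen s < i)) strings := rfl
      simp [List.countP_map, hcomp]
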